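-- pv_equiv track=rewrite | github.com/chrisdean258/aoc-2025 | day-10/part-1.py | bfs
-- ===== SOURCE A (Python) =====
-- from collections import deque
--
-- def bfs(target, buttons):
--     seen = set()
--     q = deque([(0, 0)])
--     while q:
--         count, item = q.popleft()
--         if item == target:
--             return count
--         for button in buttons:
--             v = item ^ button
--             if v not in seen:
--                 q.append((count + 1, v))
--                 seen.add(v)
--     raise Exception((target, buttons))
-- ===== SOURCE B (Python) =====
-- def bfs(target, buttons):
--     # Level-synchronous BFS: whole frontier sets per level instead of a node queue.
--     seen = set()
--     frontier = {0}
--     level = 0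
--     while frontier:
--         if target in frontier:
--             return level
--         next_frontier = {x ^ b for x in frontier for b in buttons if (x ^ b) not in seen}
--         seen |= next_frontier
--         frontier = next_frontier
--         level += 1
--     raise Exception((target, buttons))
-- ===== Notes on version B (the rewrite author's own statement) =====
-- stated objective: alternative
-- what changed: Replaced the node-at-a-time deque BFS (popping (count,item) pairs and enqueueing children one by one) with a level-synchronous BFS that keeps a whole frontier set per level, checks the target once per level and advances by a set comprehension; Pre_ excludes the inputs where A raises (target not an XOR of any subset of buttons).
import Mathlib
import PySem

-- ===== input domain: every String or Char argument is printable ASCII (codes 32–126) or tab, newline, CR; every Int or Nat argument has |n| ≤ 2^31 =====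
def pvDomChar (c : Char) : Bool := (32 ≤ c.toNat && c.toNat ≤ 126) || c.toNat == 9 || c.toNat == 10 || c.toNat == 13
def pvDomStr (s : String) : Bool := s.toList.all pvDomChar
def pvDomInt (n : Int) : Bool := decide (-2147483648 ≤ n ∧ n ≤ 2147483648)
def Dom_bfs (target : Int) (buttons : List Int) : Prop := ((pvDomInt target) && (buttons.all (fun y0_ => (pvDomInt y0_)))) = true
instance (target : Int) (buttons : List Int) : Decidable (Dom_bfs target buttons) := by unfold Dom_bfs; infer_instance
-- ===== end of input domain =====

-- B replaces A's node-at-a-time deque BFS by a level-synchronous frontier-set BFS (alternative decomposition, same cost).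

-- ===== PORT A =====
-- Queue-based BFS, one pop per step.  The fuel counts pops; 2^|buttons|+2 pops always
-- suffice (the seen set stays inside the XOR span of the buttons, proved below), so the
-- fuel-exhausted branch is never taken.  Python's `raise Exception(...)` paths (queue
-- exhausted) return the sentinel 0 and lie outside Pre_bfs.
def bfsLoopA (target : Int) (buttons : List Int) : Nat → List Int → List (Int × Int) → Int
  | 0, _, _ => 0
  | _ + 1, _, [] => 0
  | fuel + 1, seen, (count, item) :: q =>
    if item = target then count
    else
      let st := buttons.foldl
        (fun (st : List Int × List (Int × Int)) button =>
          let v := PySem.Int.bxor item button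
          if v ∈ st.1 then st else (st.1 ++ [v], st.2 ++ [(count + 1, v)]))
        (seen, q)
      bfsLoopA target buttons fuel st.1 st.2

def bfs (target : Int) (buttons : List Int) : Int :=
  bfsLoopA target buttons (2 ^ buttons.length + 2) [] [(0, 0)]

-- ===== PORT B =====
-- Level-synchronous BFS: the fuel counts LEVELS (2^|buttons|+2 levels always suffice);
-- `raise Exception(...)` (empty frontier) returns the sentinel 0, outside Pre_bfs.
def bfsLoopB (target : Int) (buttons : List Int) : Nat → PySem.Set Int → PySem.Set Int → Int → Int
  | 0, _, _, _ => 0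
  | fuel + 1, seen, frontier, level =>
    if target ∈ frontier then level
    else
      let next := frontier.foldl (fun acc x =>
        buttons.foldl (fun acc b =>
          let v := PySem.Int.bxor x b
          if v ∈ seen then acc else PySem.Set.add acc v) acc) []
      if next = [] then 0
      else bfsLoopB target buttons fuel (PySem.Set.union seen next) next (level + 1)

def bfs_alt (target : Int) (buttons : List Int) : Int :=
  bfsLoopB target buttons (2 ^ buttons.length + 2) [] [0] 0

-- ===== PRECONDITION & SPEC =====
-- The XOR span of the buttons: all values reachable from 0 by XORing buttons.
def spanXor : List Int → Finset Int
  | [] => {0}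
  | b :: bs => spanXor bs ∪ (spanXor bs).image (fun x => PySem.Int.bxor x b)

-- Pre_ excludes exactly the inputs on which A raises: targets that are not an XOR of any
-- subset of the buttons (then the BFS exhausts its queue and A raises Exception).
def Pre_bfs (target : Int) (buttons : List Int) : Prop := target ∈ spanXor buttons
instance (target : Int) (buttons : List Int) : Decidable (Pre_bfs target buttons) := by
  unfold Pre_bfs; infer_instance

def pvWitness_bfs : Int × List Int := (3, [1, 2])

def Spec_bfs (target : Int) (buttons : List Int) (out : Int) : Prop := out = bfs_alt target buttons
instance (target : Int) (buttons : List Int) (out : Int) : Decidable (Spec_bfs target buttons out) := by unfold Spec_bfs; infer_instance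

-- ===== CLAIM (what is proved, stated in full; the proofs are below) =====
def Claim_equal_bfs : Prop := ∀ (target : Int) (buttons : List Int), Dom_bfs target buttons → Pre_bfs target buttons → Spec_bfs target buttons (bfs target buttons)

-- ===== LEMMAS AND PROOFS =====

-- XOR is an abelian group operation on ℤ (bridge to Mathlib's Int.xor for associativity).
theorem bxor_eq_intXor (a b : Int) : PySem.Int.bxor a b = Int.xor a b := by
  cases a with
  | ofNat m => cases b with
    | ofNat n => simp [PySem.Int.bxor, Int.xor]
    | negSucc n => simp [PySem.Int.bxor, Int.xor]; omega
  | negSucc m => cases b with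
    | ofNat n => simp [PySem.Int.bxor, Int.xor]; omega
    | negSucc n => simp [PySem.Int.bxor, Int.xor]

theorem intXor_assoc (a b c : Int) : Int.xor (Int.xor a b) c = Int.xor a (Int.xor b c) := by
  cases a <;> cases b <;> cases c <;> simp [Int.xor, Nat.xor_assoc]

theorem bxor_assoc (a b c : Int) :
    PySem.Int.bxor (PySem.Int.bxor a b) c = PySem.Int.bxor a (PySem.Int.bxor b c) := by
  simp [bxor_eq_intXor, intXor_assoc]

theorem bxor_cancel_right (a b : Int) : PySem.Int.bxor (PySem.Int.bxor a b) b = a := by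
  rw [bxor_assoc, PySem.Int.bxor_self, PySem.Int.bxor_zero]

theorem bxor_right_comm (a b c : Int) :
    PySem.Int.bxor (PySem.Int.bxor a b) c = PySem.Int.bxor (PySem.Int.bxor a c) b := by
  rw [bxor_assoc, bxor_assoc, PySem.Int.bxor_comm b c]

theorem zero_mem_spanXor (bs : List Int) : (0 : Int) ∈ spanXor bs := by
  induction bs with
  | nil => simp [spanXor]
  | cons b bs ih => simp [spanXor]; left; exact ih

theorem spanXor_closed : ∀ (bs : List Int) (x b : Int), x ∈ spanXor bs → b ∈ bs →
    PySem.Int.bxor x b ∈ spanXor bs := by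
  intro bs
  induction bs with
  | nil => intro x b _ hb; cases hb
  | cons b0 bs ih =>
    intro x b hx hb
    simp only [spanXor, Finset.mem_union, Finset.mem_image] at hx ⊢
    cases hb with
    | head =>
      cases hx with
      | inl h => exact Or.inr ⟨x, h, rfl⟩
      | inr h =>
        rcases h with ⟨y, hy, rfl⟩
        exact Or.inl (by rwa [bxor_cancel_right])
    | tail _ hb =>
      cases hx with
      | inl h => exact Or.inl (ih x b h hb)
      | inr h =>
        rcases h with ⟨y, hy, rfl⟩
        exact Or.inr ⟨PySem.Int.bxor y b, ih y b hy hb, by rw [bxor_right_comm]⟩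

theorem spanXor_card_le (bs : List Int) : (spanXor bs).card ≤ 2 ^ bs.length := by
  induction bs with
  | nil => simp [spanXor]
  | cons b bs ih =>
    calc (spanXor (b :: bs)).card
        ≤ (spanXor bs).card + ((spanXor bs).image (fun x => PySem.Int.bxor x b)).card :=
          Finset.card_union_le _ _
      _ ≤ 2 ^ bs.length + 2 ^ bs.length :=
          Nat.add_le_add ih (le_trans (Finset.card_image_le) ih)
      _ = 2 ^ (b :: bs).length := by simp [List.length_cons, pow_succ]; ring

-- The new values produced by expanding one item (A's inner loop), with the seen set threaded.
def newI (buttons : List Int) (x : Int) (seen : List Int) : List Int :=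
  match buttons with
  | [] => []
  | b :: bs =>
    let v := PySem.Int.bxor x b
    if v ∈ seen then newI bs x seen else v :: newI bs x (seen ++ [v])

-- The new values produced by expanding a whole level (A's processing of a frontier).
def newF (buttons : List Int) (seen : List Int) : List Int → List Int
  | [] => []
  | x :: F => let d := newI buttons x seen; d ++ newF buttons (seen ++ d) F

theorem mem_newI {x v : Int} : ∀ (buttons seen : List Int),
    (v ∈ newI buttons x seen ↔ v ∉ seen ∧ ∃ b ∈ buttons, v = PySem.Int.bxor x b) := by
  intro buttons
  induction buttons with
  | nil => intro seen; simp [newI]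
  | cons b bs ih =>
    intro seen
    simp only [newI]
    by_cases h : PySem.Int.bxor x b ∈ seen
    · rw [if_pos h, ih]
      constructor
      · rintro ⟨hv, b', hb', rfl⟩
        exact ⟨hv, b', List.mem_cons_of_mem _ hb', rfl⟩
      · rintro ⟨hv, b', hb', rfl⟩
        cases hb' with
        | head => exact absurd h hv
        | tail _ hb' => exact ⟨hv, b', hb', rfl⟩
    · rw [if_neg h]
      simp only [List.mem_cons, ih, List.mem_append]
      constructor
      · rintro (rfl | ⟨hv, b', hb', rfl⟩)
        · exact ⟨h, b, Or.inl rfl, rfl⟩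
        · exact ⟨fun hs => hv (Or.inl hs), b', Or.inr hb', rfl⟩
      · rintro ⟨hv, b', (rfl | hb'), rfl⟩
        · exact Or.inl rfl
        · by_cases he : PySem.Int.bxor x b' = PySem.Int.bxor x b
          · exact Or.inl he
          · refine Or.inr ⟨?_, b', hb', rfl⟩
            simp [hv, he]

theorem nodup_newI {x : Int} : ∀ (buttons seen : List Int), (newI buttons x seen).Nodup := by
  intro buttons
  induction buttons with
  | nil => intro seen; simp [newI]
  | cons b bs ih =>
    intro seen
    simp only [newI]
    by_cases h : PySem.Int.bxor x b ∈ seen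
    · rw [if_pos h]; exact ih seen
    · rw [if_neg h]
      refine List.Nodup.cons ?_ (ih _)
      intro hmem
      exact ((mem_newI bs _).mp hmem).1 (List.mem_append_right _ (List.mem_singleton.mpr rfl))

theorem mem_newF {buttons : List Int} {v : Int} : ∀ (F seen : List Int),
    (v ∈ newF buttons seen F ↔
      v ∉ seen ∧ ∃ x ∈ F, ∃ b ∈ buttons, v = PySem.Int.bxor x b) := by
  intro F
  induction F with
  | nil => intro seen; simp [newF]
  | cons x F ih =>
    intro seen
    simp only [newF]
    constructor
    · intro hmem
      rcases List.mem_append.mp hmem with hd | hF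
      · rcases (mem_newI buttons seen).mp hd with ⟨hv, b, hb, rfl⟩
        exact ⟨hv, x, List.mem_cons_self .., b, hb, rfl⟩
      · rcases (ih _).mp hF with ⟨hv, x', hx', b, hb, rfl⟩
        exact ⟨fun hs => hv (List.mem_append_left _ hs), x', List.mem_cons_of_mem _ hx', b, hb, rfl⟩
    · rintro ⟨hv, x', hx', b, hb, rfl⟩
      by_cases hd : PySem.Int.bxor x' b ∈ newI buttons x seen
      · exact List.mem_append_left _ hd
      · cases hx' with
        | head => exact List.mem_append_left _ ((mem_newI buttons seen).mpr ⟨hv, b, hb, rfl⟩)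
        | tail _ hx' =>
          refine List.mem_append_right _ ((ih _).mpr ⟨?_, x', hx', b, hb, rfl⟩)
          intro hmem
          rcases List.mem_append.mp hmem with hs | hN
          · exact hv hs
          · exact hd hN

theorem nodup_newF {buttons : List Int} : ∀ (F seen : List Int), (newF buttons seen F).Nodup := by
  intro F
  induction F with
  | nil => intro seen; simp [newF]
  | cons x F ih =>
    intro seen
    simp only [newF]
    refine List.Nodup.append (nodup_newI ..) (ih _) ?_
    intro v hd hF
    exact ((mem_newF _ _).mp hF).1 (List.mem_append_right _ hd)

-- A's inner per-item fold, in terms of newI.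
theorem foldA_eq {x c : Int} : ∀ (buttons seen : List Int) (q : List (Int × Int)),
      buttons.foldl
        (fun (st : List Int × List (Int × Int)) button =>
          let v := PySem.Int.bxor x button
          if v ∈ st.1 then st else (st.1 ++ [v], st.2 ++ [(c + 1, v)]))
        (seen, q)
      = (seen ++ newI buttons x seen,
         q ++ (newI buttons x seen).map (fun v => (c + 1, v))) := by
  intro buttons
  induction buttons with
  | nil => intro seen q; simp [newI]
  | cons b bs ih =>
    intro seen q
    simp only [List.foldl_cons, newI]
    by_cases h : PySem.Int.bxor x b ∈ seen
    · rw [if_pos h, if_pos h]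
      exact ih seen q
    · rw [if_neg h, if_neg h]
      rw [ih (seen ++ [PySem.Int.bxor x b]) (q ++ [(c + 1, PySem.Int.bxor x b)])]
      simp

-- A whole level of A's queue loop, in terms of newF.
theorem levelA {target : Int} {buttons : List Int} :
    ∀ (F : List Int) (L2 : List (Int × Int)) (seen : List Int) (fuel : Nat) (k : Int),
      bfsLoopA target buttons (F.length + fuel) seen (F.map (fun x => (k, x)) ++ L2)
      = if target ∈ F then k
        else bfsLoopA target buttons fuel (seen ++ newF buttons seen F)
              (L2 ++ (newF buttons seen F).map (fun v => (k + 1, v))) := by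
  intro F
  induction F with
  | nil => intro L2 seen fuel k; simp [newF]
  | cons x F ih =>
    intro L2 seen fuel k
    have hlen : (x :: F).length + fuel = (F.length + fuel) + 1 := by
      simp [List.length_cons]; omega
    rw [hlen]
    simp only [List.map_cons, List.cons_append, bfsLoopA]
    by_cases hx : x = target
    · rw [if_pos hx]
      have : target ∈ x :: F := by rw [hx] at *; exact List.mem_cons_self ..
      rw [if_pos this]
    · rw [if_neg hx]
      rw [foldA_eq buttons seen (F.map (fun x => (k, x)) ++ L2)]
      have hassoc : F.map (fun x => (k, x)) ++ L2 ++ (newI buttons x seen).map (fun v => (k + 1, v))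
          = F.map (fun x => (k, x)) ++ (L2 ++ (newI buttons x seen).map (fun v => (k + 1, v))) := by
        simp
      rw [hassoc, ih]
      by_cases ht : target ∈ F
      · simp [ht, List.mem_cons]
      · have ht' : ¬ target ∈ x :: F := by
          simp [List.mem_cons, ht]; exact fun h => hx h.symm
        rw [if_neg ht, if_neg ht']
        simp only [newF]
        simp [List.append_assoc]

-- B's frontier comprehension: inner fold over the buttons, membership.
theorem mem_innerB {seen : List Int} {x v : Int} : ∀ (bs acc : List Int),
    (v ∈ bs.foldl (fun acc b =>
        if PySem.Int.bxor x b ∈ seen then acc else PySem.Set.add acc (PySem.Int.bxor x b)) acc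
     ↔ v ∈ acc ∨ (v ∉ seen ∧ ∃ b ∈ bs, v = PySem.Int.bxor x b)) := by
  intro bs
  induction bs with
  | nil => intro acc; simp
  | cons b bs ih =>
    intro acc
    simp only [List.foldl_cons]
    by_cases h : PySem.Int.bxor x b ∈ seen
    · rw [if_pos h, ih]
      constructor
      · rintro (ha | ⟨hv, b', hb', rfl⟩)
        · exact Or.inl ha
        · exact Or.inr ⟨hv, b', List.mem_cons_of_mem _ hb', rfl⟩
      · rintro (ha | ⟨hv, b', hb', rfl⟩)
        · exact Or.inl ha
        · cases hb' with
          | head => exact absurd h hv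
          | tail _ hb' => exact Or.inr ⟨hv, b', hb', rfl⟩
    · rw [if_neg h, ih]
      simp only [PySem.Set.mem_add]
      constructor
      · rintro ((ha | rfl) | ⟨hv, b', hb', rfl⟩)
        · exact Or.inl ha
        · exact Or.inr ⟨h, b, List.mem_cons_self .., rfl⟩
        · exact Or.inr ⟨hv, b', List.mem_cons_of_mem _ hb', rfl⟩
      · rintro (ha | ⟨hv, b', hb', rfl⟩)
        · exact Or.inl (Or.inl ha)
        · cases hb' with
          | head => exact Or.inl (Or.inr rfl)
          | tail _ hb' => exact Or.inr ⟨hv, b', hb', rfl⟩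

-- B's frontier comprehension: membership in the computed next frontier.
theorem mem_nextB {buttons seen : List Int} {v : Int} : ∀ (F acc : List Int),
    (v ∈ F.foldl (fun acc x =>
        buttons.foldl (fun acc b =>
          if PySem.Int.bxor x b ∈ seen then acc else PySem.Set.add acc (PySem.Int.bxor x b)) acc) acc
     ↔ v ∈ acc ∨ (v ∉ seen ∧ ∃ x ∈ F, ∃ b ∈ buttons, v = PySem.Int.bxor x b)) := by
  intro F
  induction F with
  | nil => intro acc; simp
  | cons x F ih =>
    intro acc
    simp only [List.foldl_cons]
    rw [ih, mem_innerB]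
    constructor
    · rintro ((ha | ⟨hv, b, hb, rfl⟩) | ⟨hv, x', hx', b, hb, rfl⟩)
      · exact Or.inl ha
      · exact Or.inr ⟨hv, x, List.mem_cons_self .., b, hb, rfl⟩
      · exact Or.inr ⟨hv, x', List.mem_cons_of_mem _ hx', b, hb, rfl⟩
    · rintro (ha | ⟨hv, x', hx', b, hb, rfl⟩)
      · exact Or.inl (Or.inl ha)
      · cases hx' with
        | head => exact Or.inl (Or.inr ⟨hv, b, hb, rfl⟩)
        | tail _ hx' => exact Or.inr ⟨hv, x', hx', b, hb, rfl⟩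

-- Number of span elements not yet seen-- Number of span elements not yet seen: the measure of the BFS.
def mu (buttons : List Int) (seen : List Int) : Nat :=
  ((spanXor buttons).filter (fun v => v ∉ seen)).card

theorem mu_append {buttons : List Int} {seen N : List Int}
    (hN : ∀ v ∈ N, v ∈ spanXor buttons ∧ v ∉ seen) (hnd : N.Nodup) :
    mu buttons (seen ++ N) = mu buttons seen - N.length := by
  have h1 : (spanXor buttons).filter (fun v => v ∉ seen ++ N)
      = ((spanXor buttons).filter (fun v => v ∉ seen)) \ N.toFinset := by
    ext v
    simp only [Finset.mem_filter, Finset.mem_sdiff, List.mem_toFinset, List.mem_append]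
    tauto
  have h2 : N.toFinset ⊆ (spanXor buttons).filter (fun v => v ∉ seen) := by
    intro v hv
    rcases hN v (List.mem_toFinset.mp hv) with ⟨h3, h4⟩
    exact Finset.mem_filter.mpr ⟨h3, h4⟩
  unfold mu
  rw [h1, Finset.card_sdiff_of_subset h2, List.toFinset_card_of_nodup hnd]

theorem len_le_mu {buttons : List Int} {seen N : List Int}
    (hN : ∀ v ∈ N, v ∈ spanXor buttons ∧ v ∉ seen) (hnd : N.Nodup) :
    N.length ≤ mu buttons seen := by
  have h2 : N.toFinset ⊆ (spanXor buttons).filter (fun v => v ∉ seen) := by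
    intro v hv
    rcases hN v (List.mem_toFinset.mp hv) with ⟨h3, h4⟩
    exact Finset.mem_filter.mpr ⟨h3, h4⟩
  calc N.length = N.toFinset.card := (List.toFinset_card_of_nodup hnd).symm
    _ ≤ _ := Finset.card_le_card h2

theorem main_lemma {target : Int} {buttons : List Int} :
    ∀ (n : Nat) (seenA seenB FA FB : List Int) (k : Int) (f g : Nat),
      mu buttons seenA = n →
      (∀ v : Int, (v ∈ seenA ↔ v ∈ seenB)) →
      (∀ v : Int, (v ∈ FA ↔ v ∈ FB)) →
      (∀ v ∈ FA, v ∈ spanXor buttons) →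
      FA.length + n + 1 ≤ f → n + 1 ≤ g →
      bfsLoopA target buttons f seenA (FA.map (fun x => (k, x)))
        = bfsLoopB target buttons g seenB FB k := by
  intro n
  induction n using Nat.strong_induction_on with
  | _ n ih =>
    intro seenA seenB FA FB k f g hmu hseen hF hspan hf hg
    obtain ⟨f', hfe, hf'⟩ : ∃ f', f = FA.length + f' ∧ n + 1 ≤ f' :=
      ⟨f - FA.length, by omega, by omega⟩
    subst hfe
    obtain ⟨g', hge⟩ : ∃ g', g = g' + 1 := ⟨g - 1, by omega⟩
    subst hge
    have hL := levelA (target := target) (buttons := buttons) FA [] seenA f' k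
    rw [List.append_nil] at hL
    rw [hL]
    simp only [bfsLoopB]
    set N := newF buttons seenA FA with hNdef
    -- facts about N
    have hmemN : ∀ v : Int, (v ∈ N ↔ v ∉ seenA ∧ ∃ x ∈ FA, ∃ b ∈ buttons, v = PySem.Int.bxor x b) :=
      fun v => mem_newF FA seenA
    have hNfacts : ∀ v ∈ N, v ∈ spanXor buttons ∧ v ∉ seenA := by
      intro v hv
      rcases (hmemN v).mp hv with ⟨hvs, x, hx, b, hb, rfl⟩
      exact ⟨spanXor_closed buttons x b (hspan x hx) hb, hvs⟩
    have hNnd : N.Nodup := nodup_newF FA seenA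
    by_cases ht : target ∈ FA
    · rw [if_pos ht, if_pos ((hF target).mp ht)]
    · rw [if_neg ht, if_neg (fun h => ht ((hF target).mpr h))]
      have hnext : ∀ v : Int,
          (v ∈ FB.foldl (fun acc x =>
              buttons.foldl (fun acc b =>
                if PySem.Int.bxor x b ∈ seenB then acc else PySem.Set.add acc (PySem.Int.bxor x b)) acc) []
           ↔ v ∈ N) := by
        intro v
        rw [mem_nextB FB [], hmemN]
        simp only [List.not_mem_nil, false_or]
        constructor
        · rintro ⟨hv, x, hx, b, hb, rfl⟩
          exact ⟨fun hs => hv ((hseen _).mp hs), x, (hF x).mpr hx, b, hb, rfl⟩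
        · rintro ⟨hv, x, hx, b, hb, rfl⟩
          exact ⟨fun hs => hv ((hseen _).mpr hs), x, (hF x).mp hx, b, hb, rfl⟩
      by_cases he : FB.foldl (fun acc x =>
          buttons.foldl (fun acc b =>
            if PySem.Int.bxor x b ∈ seenB then acc else PySem.Set.add acc (PySem.Int.bxor x b)) acc) [] = []
      · rw [if_pos he]
        have hNnil : N = [] := by
          rw [List.eq_nil_iff_forall_not_mem]
          intro v hv
          have := (hnext v).mpr hv
          rw [he] at this
          exact List.not_mem_nil this
        rw [hNnil]
        obtain ⟨f'', rfl⟩ : ∃ f'', f' = f'' + 1 := ⟨f' - 1, by omega⟩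
        rfl
      · rw [if_neg he]
        have hNne : N ≠ [] := by
          intro h
          rcases List.exists_mem_of_ne_nil _ he with ⟨v, hv⟩
          have := (hnext v).mp hv
          rw [h] at this
          exact List.not_mem_nil this
        have hlen1 : 1 ≤ N.length := List.length_pos_of_ne_nil hNne
        have hlenle : N.length ≤ n := hmu ▸ len_le_mu hNfacts hNnd
        have hmu' : mu buttons (seenA ++ N) = n - N.length := by
          rw [mu_append hNfacts hNnd, hmu]
        refine ih (n - N.length) (by omega) (seenA ++ N) _ N _ (k + 1) f' g' hmu' ?_ ?_ ?_ (by omega) (by omega)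
        · intro v
          rw [PySem.Set.mem_union, List.mem_append, hnext v]
          constructor
          · rintro (hs | hn)
            · exact Or.inl ((hseen v).mp hs)
            · exact Or.inr hn
          · rintro (hs | hn)
            · exact Or.inl ((hseen v).mpr hs)
            · exact Or.inr hn
        · exact fun v => (hnext v).symm
        · exact fun v hv => (hNfacts v hv).1

-- ===== VERDICT (by name: the statement is the Claim_ definition above) =====
theorem bfs_spec : Claim_equal_bfs := by
  intro target buttons _ _
  unfold Spec_bfs bfs bfs_alt
  have h0 : mu buttons [] = (spanXor buttons).card := by
    unfold mu
    congr 1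
    apply Finset.filter_true_of_mem
    intro v _
    exact List.not_mem_nil
  have hcard := spanXor_card_le buttons
  have hmap : ([0] : List Int).map (fun x => ((0 : Int), x)) = [(0, 0)] := by simp
  rw [← hmap]
  exact main_lemma (mu buttons []) [] [] [0] [0] 0 _ _ rfl (fun v => Iff.rfl) (fun v => Iff.rfl)
    (fun v hv => by simp at hv; rw [hv]; exact zero_mem_spanXor buttons)
    (by simp [h0]; omega) (by omega)
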